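-- pv_equiv track=rewrite | github.com/Lilaa3/fast64 | fast64_internal/sm64/geolayout/sm64_geolayout_writer.py | convertVertDictToArray
-- ===== SOURCE A (Python) =====
-- def convertVertDictToArray(vertDict):
--     data = []
--     matRegions = {}
--     for material_index, vertex_data in vertDict:
--         start = len(data)
--         data.extend(vertex_data)
--         end = len(data)
--         matRegions[material_index] = (start, end)
--     return data, matRegions
-- ===== SOURCE B (Python) =====
-- def convertVertDictToArray(vertDict):
--     items = list(vertDict)
--     lengths = [len(vd) for _, vd in items]
--     ends = []
--     total = 0
--     for n in lengths:
--         total += n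
--         ends.append(total)
--     data = [x for _, vd in items for x in vd]
--     matRegions = {mi: (e - n, e) for (mi, _), n, e in zip(items, lengths, ends)}
--     return data, matRegions
-- ===== Notes on version B (the rewrite author's own statement) =====
-- stated objective: alternative
-- what changed: B precomputes per-entry lengths and cumulative end offsets (prefix sums), flattens the data in one comprehension, and builds the region dict from a zip, instead of reading len(data) while extending it in a single loop.
import Mathlib
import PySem

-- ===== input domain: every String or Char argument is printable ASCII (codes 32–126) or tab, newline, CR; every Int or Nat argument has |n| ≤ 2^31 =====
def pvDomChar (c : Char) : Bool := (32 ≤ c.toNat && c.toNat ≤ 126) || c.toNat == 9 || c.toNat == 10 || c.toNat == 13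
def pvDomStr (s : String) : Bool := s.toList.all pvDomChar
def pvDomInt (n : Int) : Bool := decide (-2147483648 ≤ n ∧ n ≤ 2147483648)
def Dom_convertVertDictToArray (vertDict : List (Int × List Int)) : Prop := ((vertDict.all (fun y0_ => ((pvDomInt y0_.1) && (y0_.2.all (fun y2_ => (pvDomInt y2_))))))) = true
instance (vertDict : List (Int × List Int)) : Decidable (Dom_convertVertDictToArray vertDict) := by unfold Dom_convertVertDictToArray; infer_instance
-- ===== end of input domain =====

-- B builds the region table from prefix sums of the per-entry lengths and flattens the
-- data in one pass, instead of reading len(data) while extending it (objective: alternative).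

-- ===== PORT A =====
-- one loop: extend data, record (start, end) read off len(data) before/after
def convertVertDictToArray (vertDict : List (Int × List Int)) : List Int × (List (Int × Int × Int)) :=
  let res := vertDict.foldl
    (fun (acc : List Int × PySem.Dict Int (Int × Int)) p =>
      let start : Int := acc.1.length
      let data := acc.1 ++ p.2
      let e : Int := data.length
      (data, acc.2.insert p.1 (start, e)))
    ([], PySem.Dict.empty)
  (res.1, res.2.items)

-- ===== PORT B =====
-- ends = [] ; total = 0 ; for n in lengths: total += n; ends.append(total)
def pvAltEnds (lengths : List Int) : List Int :=
  (lengths.foldl (fun (acc : Int × List Int) n => (acc.1 + n, acc.2 ++ [acc.1 + n])) (0, [])).2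

def convertVertDictToArray_alt (vertDict : List (Int × List Int)) : List Int × (List (Int × Int × Int)) :=
  let items := vertDict
  let lengths := items.map (fun p => (p.2.length : Int))
  let ends := pvAltEnds lengths
  let data := items.flatMap (fun p => p.2)
  let matRegions := (items.zip (lengths.zip ends)).foldl
    (fun (d : PySem.Dict Int (Int × Int)) x => d.insert x.1.1 (x.2.2 - x.2.1, x.2.2))
    PySem.Dict.empty
  (data, matRegions.items)

-- ===== PRECONDITION & SPEC =====
def Spec_convertVertDictToArray (vertDict : List (Int × List Int)) (out : List Int × (List (Int × Int × Int))) : Prop := out = convertVertDictToArray_alt vertDict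
instance (vertDict : List (Int × List Int)) (out : List Int × (List (Int × Int × Int))) : Decidable (Spec_convertVertDictToArray vertDict out) := by unfold Spec_convertVertDictToArray; infer_instance

-- ===== CLAIM (what is proved, stated in full; the proofs are below) =====
def Claim_equal_convertVertDictToArray : Prop := ∀ (vertDict : List (Int × List Int)), Dom_convertVertDictToArray vertDict → Spec_convertVertDictToArray vertDict (convertVertDictToArray vertDict)

-- ===== LEMMAS AND PROOFS =====

-- pure recursive form of the prefix-sum loop, started at offset t
def pvEnds (t : Int) : List Int → List Int
  | [] => []
  | n :: ns => (t + n) :: pvEnds (t + n) ns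

lemma pvEnds_foldl (l : List Int) : ∀ (t : Int) (acc : List Int),
    l.foldl (fun (acc : Int × List Int) n => (acc.1 + n, acc.2 ++ [acc.1 + n])) (t, acc)
      = (t + l.sum, acc ++ pvEnds t l) := by
  induction l with
  | nil => intro t acc; simp [pvEnds]
  | cons n ns ih =>
      intro t acc
      simp only [List.foldl_cons, ih, pvEnds, List.sum_cons]
      rw [Prod.mk.injEq]
      exact ⟨by ring, by simp⟩

lemma pvAltEnds_eq (l : List Int) : pvAltEnds l = pvEnds 0 l := by
  simp [pvAltEnds, pvEnds_foldl]

lemma main_fold (l : List (Int × List Int)) :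
    ∀ (data0 : List Int) (d0 : PySem.Dict Int (Int × Int)),
    l.foldl
      (fun (acc : List Int × PySem.Dict Int (Int × Int)) p =>
        let start : Int := acc.1.length
        let data := acc.1 ++ p.2
        let e : Int := data.length
        (data, acc.2.insert p.1 (start, e)))
      (data0, d0)
    = (data0 ++ l.flatMap (fun p => p.2),
       (l.zip ((l.map (fun p => (p.2.length : Int))).zip
          (pvEnds (data0.length : Int) (l.map (fun p => (p.2.length : Int)))))).foldl
        (fun (d : PySem.Dict Int (Int × Int)) x => d.insert x.1.1 (x.2.2 - x.2.1, x.2.2)) d0) := by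
  induction l with
  | nil => intro data0 d0; simp
  | cons p ps ih =>
      intro data0 d0
      simp only [List.foldl_cons, List.map_cons, pvEnds, List.zip_cons_cons, ih]
      have hlen : (((data0 ++ p.2).length : ℕ) : Int)
          = (data0.length : Int) + (p.2.length : Int) := by
        simp [List.length_append]
      have hstart : (data0.length : Int) + (p.2.length : Int) - (p.2.length : Int)
          = (data0.length : Int) := by ring
      rw [Prod.mk.injEq]
      exact ⟨by simp [List.flatMap_cons], by rw [hlen, hstart]⟩

theorem convertVertDictToArray_spec : Claim_equal_convertVertDictToArray := by
  intro vertDict _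
  show convertVertDictToArray vertDict = convertVertDictToArray_alt vertDict
  simp only [convertVertDictToArray, convertVertDictToArray_alt, pvAltEnds_eq, main_fold,
    List.length_nil, Nat.cast_zero, List.nil_append]
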